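-- pv_equiv track=rewrite | github.com/Steve973/pybastion | pybastion-common/pybastion_common/models.py | _is_project_type
-- ===== SOURCE A (Python) =====
-- def _is_project_type(target: str, project_types: set[str]) -> bool:
--     """
--     Check if target is from project inventory.
--     """
--     # Normalize: remove empty parens from constructor calls
--     # e.g., "ResolutionPolicy().to_mapping" -> "ResolutionPolicy.to_mapping"
--     normalized_target = target.replace('()', '')
--
--     # Direct match
--     if normalized_target in project_types:
--         return True
--
--     # Check if target is a method/attribute of a project type
--     # e.g., target="MyClass.method" matches project_type="module.MyClass.method"
--     for project_type in project_types:
--         if normalized_target.startswith(project_type + '.'):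
--             return True
--         # Check if project_type ends with the target
--         # e.g., target="WheelKey.as_tuple" matches "project.keys.WheelKey.as_tuple"
--         if project_type.endswith(normalized_target) or project_type.endswith('.' + normalized_target):
--             return True
--
--     return False
-- ===== SOURCE B (Python) =====
-- def _is_project_type(target: str, project_types: set[str]) -> bool:
--     """
--     Check if target is from project inventory.
--     """
--     # Normalize: remove empty parens from constructor calls
--     normalized_target = target.replace('()', '')
--
--     # Direct match
--     if normalized_target in project_types:
--         return True
--
--     # Target-driven pass: every '.' in the target marks a dot-boundary
--     # prefix; the target is a method/attribute of a project type exactly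
--     # when such a prefix is itself a project type.
--     for i, ch in enumerate(normalized_target):
--         if ch == '.' and normalized_target[:i] in project_types:
--             return True
--
--     # Suffix pass: a project type ending in the target also matches
--     # (pt.endswith('.' + nt) from A is subsumed by pt.endswith(nt)).
--     return any(pt.endswith(normalized_target) for pt in project_types)
-- ===== Notes on version B (the rewrite author's own statement) =====
-- stated objective: faster
-- what changed: A runs one combined scan over project_types testing startswith(pt + '.') plus two endswith per element (building two temporary concatenations per element); B replaces the startswith scan by a target-driven pass over the characters of the normalized target that tests each dot-boundary prefix for set membership, and keeps a single endswith test per project type (the '.'+target variant being subsumed), with no per-element string concatenation.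
import Mathlib
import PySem

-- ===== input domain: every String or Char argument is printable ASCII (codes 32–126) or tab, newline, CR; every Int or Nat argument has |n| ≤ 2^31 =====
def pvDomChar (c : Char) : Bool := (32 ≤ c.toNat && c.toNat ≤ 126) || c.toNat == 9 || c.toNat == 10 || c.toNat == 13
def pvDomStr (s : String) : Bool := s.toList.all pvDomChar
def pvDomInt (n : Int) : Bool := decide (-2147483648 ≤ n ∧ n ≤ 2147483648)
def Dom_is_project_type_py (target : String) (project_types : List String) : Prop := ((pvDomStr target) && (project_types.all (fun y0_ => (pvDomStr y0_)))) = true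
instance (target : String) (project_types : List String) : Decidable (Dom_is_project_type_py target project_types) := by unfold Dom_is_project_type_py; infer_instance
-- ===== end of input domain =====

-- B replaces A's startswith scan over project_types by a target-driven pass over the
-- characters of the normalized target ('.'-boundary prefixes tested for membership),
-- keeping one endswith test per project type; alternative decomposition, same cost class.


-- ===== PORT A =====
-- A's for-loop over project_types: startswith(pt + '.'), then the two endswith tests
def isProjTypeALoop (nt : String) : List String → Bool
  | [] => false
  | pt :: rest =>
    if PySem.Str.startswith nt (pt ++ ".") then true
    else if PySem.Str.endswith pt nt || PySem.Str.endswith pt ("." ++ nt) then true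
    else isProjTypeALoop nt rest

def is_project_type_py (target : String) (project_types : List String) : Bool :=
  let normalized_target := PySem.Str.replace target "()" ""
  if project_types.contains normalized_target then true
  else isProjTypeALoop normalized_target project_types

-- ===== PORT B =====
-- B's for-loop over enumerate(normalized_target): dot-boundary prefix membership
def isProjTypeBScan (nt : String) (project_types : List String) : List (Int × Char) → Bool
  | [] => false
  | (i, ch) :: rest =>
    if ch == '.' && project_types.contains (PySem.Str.slice nt none (some i)) then true
    else isProjTypeBScan nt project_types rest

def is_project_type_py_alt (target : String) (project_types : List String) : Bool :=
  let normalized_target := PySem.Str.replace target "()" ""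
  if project_types.contains normalized_target then true
  else if isProjTypeBScan normalized_target project_types
            (PySem.List.enumerate normalized_target.toList 0) then true
  else project_types.any (fun pt => PySem.Str.endswith pt normalized_target)

-- ===== PRECONDITION & SPEC =====
def Spec_is_project_type_py (target : String) (project_types : List String) (out : Bool) : Prop := out = is_project_type_py_alt target project_types
instance (target : String) (project_types : List String) (out : Bool) : Decidable (Spec_is_project_type_py target project_types out) := by unfold Spec_is_project_type_py; infer_instance

-- ===== CLAIM (what is proved, stated in full; the proofs are below) =====
def Claim_equal_is_project_type_py : Prop := ∀ (target : String) (project_types : List String), Dom_is_project_type_py target project_types → Spec_is_project_type_py target project_types (is_project_type_py target project_types)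

-- ===== LEMMAS AND PROOFS =====

-- A's loop is the any-fold of its three tests
theorem isProjTypeALoop_eq_any (nt : String) (pts : List String) :
    isProjTypeALoop nt pts
      = pts.any (fun pt => PySem.Str.startswith nt (pt ++ ".")
          || (PySem.Str.endswith pt nt || PySem.Str.endswith pt ("." ++ nt))) := by
  induction pts with
  | nil => rfl
  | cons pt rest ih =>
    simp only [isProjTypeALoop, List.any_cons, ih]
    cases h1 : PySem.Str.startswith nt (pt ++ ".") <;>
      cases h2 : PySem.Str.endswith pt nt || PySem.Str.endswith pt ("." ++ nt) <;> simp_all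

-- B's scan is the any-fold of its test
theorem isProjTypeBScan_eq_any (nt : String) (pts : List String) (l : List (Int × Char)) :
    isProjTypeBScan nt pts l
      = l.any (fun p => p.2 == '.' && pts.contains (PySem.Str.slice nt none (some p.1))) := by
  induction l with
  | nil => rfl
  | cons p rest ih =>
    obtain ⟨i, ch⟩ := p
    simp only [isProjTypeBScan, List.any_cons, ih]
    cases h1 : ch == '.' && pts.contains (PySem.Str.slice nt none (some i)) <;> simp_all

-- pt.endswith('.' + nt) implies pt.endswith(nt)
theorem endswith_dot_absorb (pt nt : String)
    (h : PySem.Str.endswith pt ("." ++ nt) = true) :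
    PySem.Str.endswith pt nt = true := by
  rw [PySem.Str.endswith_eq] at h ⊢
  rw [PySem.Chars.endswith_iff] at h ⊢
  simp only [String.toList_append] at h
  exact (List.suffix_cons _ _).trans (by simpa using h)

-- the startswith scan over project_types matches the dot-boundary prefix scan over the target
theorem startswith_exists_iff (nt : String) (pts : List String) :
    (∃ pt ∈ pts, PySem.Str.startswith nt (pt ++ ".") = true)
      ↔ (∃ p ∈ PySem.List.enumerate nt.toList 0,
            (p.2 == '.' && pts.contains (PySem.Str.slice nt none (some p.1))) = true) := by
  constructor
  · rintro ⟨pt, hm, h⟩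
    rw [PySem.Str.startswith_eq, PySem.Chars.startswith_iff, String.toList_append,
      show (".").toList = ['.'] from by decide] at h
    obtain ⟨t, ht⟩ := h
    have ht' : nt.toList = pt.toList ++ '.' :: t := by rw [← ht]; simp
    have hk : pt.toList.length < nt.toList.length := by rw [ht']; simp
    refine ⟨(0 + (pt.toList.length : Int), nt.toList[pt.toList.length]),
      (PySem.List.mem_enumerate_iff _ _ _).mpr ⟨pt.toList.length, hk, rfl⟩, ?_⟩
    have hc : nt.toList[pt.toList.length]'hk = '.' := by
      rw [List.getElem_of_eq ht']; simp
    have hs : PySem.Str.slice nt none (some ((0 : Int) + (pt.toList.length : Int))) = pt := by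
      apply String.toList_inj.mp
      rw [zero_add]
      simp only [PySem.Str.toList_slice, PySem.Chars.slice_eq_listSlice,
        PySem.List.slice_to_natCast]
      rw [ht']
      exact List.take_left
    refine Bool.and_eq_true _ _ |>.mpr ⟨beq_iff_eq.mpr hc, ?_⟩
    show pts.contains (PySem.Str.slice nt none (some (0 + (pt.toList.length : Int)))) = true
    rw [zero_add] at hs ⊢
    rw [hs]
    exact List.contains_iff_mem.mpr hm
  · rintro ⟨p, hpmem, hpred⟩
    obtain ⟨k, hk, rfl⟩ := (PySem.List.mem_enumerate_iff _ _ _).mp hpmem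
    simp only [Bool.and_eq_true, beq_iff_eq, List.contains_eq_mem, decide_eq_true_eq] at hpred
    obtain ⟨hc, hm⟩ := hpred
    refine ⟨_, hm, ?_⟩
    rw [PySem.Str.startswith_eq, PySem.Chars.startswith_iff, String.toList_append]
    have hslist : (PySem.Str.slice nt none (some ((0 : Int) + (k : Int)))).toList
        = nt.toList.take k := by
      rw [zero_add]
      simp only [PySem.Str.toList_slice, PySem.Chars.slice_eq_listSlice,
        PySem.List.slice_to_natCast]
    rw [hslist, show (".").toList = ['.'] from by decide]
    refine ⟨nt.toList.drop (k + 1), ?_⟩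
    calc nt.toList.take k ++ ['.'] ++ nt.toList.drop (k + 1)
        = nt.toList.take k ++ ('.' :: nt.toList.drop (k + 1)) := by simp
      _ = nt.toList.take k ++ (nt.toList[k] :: nt.toList.drop (k + 1)) := by rw [hc]
      _ = nt.toList.take k ++ nt.toList.drop k := by rw [← List.drop_eq_getElem_cons hk]
      _ = nt.toList := List.take_append_drop k nt.toList

theorem isProjType_eq (target : String) (pts : List String) :
    is_project_type_py target pts = is_project_type_py_alt target pts := by
  unfold is_project_type_py is_project_type_py_alt
  by_cases hd : pts.contains (PySem.Str.replace target "()" "") = true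
  · rw [if_pos hd, if_pos hd]
  · rw [if_neg hd, if_neg hd]
    rw [isProjTypeALoop_eq_any, isProjTypeBScan_eq_any]
    cases hb : (PySem.List.enumerate (PySem.Str.replace target "()" "").toList 0).any
        (fun p => p.2 == '.'
          && pts.contains (PySem.Str.slice (PySem.Str.replace target "()" "") none (some p.1))) with
    | true =>
      rw [if_pos rfl]
      obtain ⟨p, hpm, hp⟩ := List.any_eq_true.mp hb
      obtain ⟨pt, hm, hs⟩ := (startswith_exists_iff _ pts).mpr ⟨p, hpm, hp⟩
      exact List.any_eq_true.mpr ⟨pt, hm, by rw [hs]; rfl⟩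
    | false =>
      rw [if_neg (by simp)]
      rw [Bool.eq_iff_iff, List.any_eq_true, List.any_eq_true]
      constructor
      · rintro ⟨pt, hm, h⟩
        rcases Bool.or_eq_true _ _ |>.mp h with h | h
        · obtain ⟨p, hpm, hp⟩ := (startswith_exists_iff _ pts).mp ⟨pt, hm, h⟩
          rw [List.any_eq_false] at hb
          exact absurd hp (hb p hpm)
        · rcases Bool.or_eq_true _ _ |>.mp h with h | h
          · exact ⟨pt, hm, h⟩
          · exact ⟨pt, hm, endswith_dot_absorb pt _ h⟩
      · rintro ⟨pt, hm, h⟩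
        exact ⟨pt, hm, by rw [h]; simp⟩

-- ===== VERDICT (by name: the statement is the Claim_ definition above) =====
theorem is_project_type_py_spec : Claim_equal_is_project_type_py := by
  intro target pts _
  show is_project_type_py target pts = is_project_type_py_alt target pts
  exact isProjType_eq target pts
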